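-- pv_equiv track=rewrite | github.com/UCI-Networking-Group/cv-inspector | cvinspector/common/webrequests_utils.py | remove_last_path
-- ===== SOURCE A (Python) =====
-- def remove_last_path(path):
--     if path == "/":
--         return path
--     path_split = path.split("/")
--     if len(path_split) > 1:
--         # get rid of empty strings
--         while len(path_split[-1]) == 0 and len(path_split) > 1:
--             path_split = path_split[0:-1]
--
--         if len(path_split) > 1 and len(path_split[-1]) > 0:
--             path_split = path_split[0:-1]
--     return "/".join(path_split)
-- ===== SOURCE B (Python) =====
-- def remove_last_path(path):
--     if path == "/":
--         return path
--     i = len(path)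
--     while i > 0 and path[i - 1] == "/":
--         i -= 1
--     j = i
--     while j > 0 and path[j - 1] != "/":
--         j -= 1
--     return path[: j - 1] if j > 0 else path[:i]
-- ===== Notes on version B (the rewrite author's own statement) =====
-- stated objective: simpler
-- what changed: Replaces A's pipeline of splitting the path into a segment list, trimming trailing empty segments in a loop, slicing off the last segment and re-joining, by two backward index scans over the string itself (skip trailing slashes, then cut just before the last slash), with no intermediate list built.
import Mathlib
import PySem

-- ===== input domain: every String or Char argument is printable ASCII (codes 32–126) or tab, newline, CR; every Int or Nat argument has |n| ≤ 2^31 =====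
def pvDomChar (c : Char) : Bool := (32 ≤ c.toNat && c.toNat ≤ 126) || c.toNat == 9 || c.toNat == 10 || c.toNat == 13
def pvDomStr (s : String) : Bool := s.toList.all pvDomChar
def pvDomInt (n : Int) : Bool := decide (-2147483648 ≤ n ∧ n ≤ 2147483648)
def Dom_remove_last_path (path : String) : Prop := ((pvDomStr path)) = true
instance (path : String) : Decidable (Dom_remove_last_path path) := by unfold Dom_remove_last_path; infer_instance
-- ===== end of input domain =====

-- B replaces A's split-into-segments / trailing-empty-trimming loop / join pipeline by two
-- backward index scans over the characters (skip trailing '/', then cut at the last '/');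
-- objective: simpler — no intermediate segment list; same return value on every input.

-- ===== PORT A =====
-- A's while loop: `while len(path_split[-1]) == 0 and len(path_split) > 1: path_split = path_split[0:-1]`
def rlpTrim (ps : List (List Char)) : List (List Char) :=
  if (PySem.List.pyGetD ps (-1) []).length = 0 ∧ 1 < ps.length then
    rlpTrim (PySem.List.slice ps none (some (-1)))
  else ps
termination_by ps.length
decreasing_by
  rename_i h
  simp [PySem.List.slice_to_neg_one, List.length_dropLast]
  omega

def remove_last_path (path : String) : String :=
  if path == "/" then path
  else
    let ps := PySem.Chars.splitOn path.toList ['/']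
    let ps := if 1 < ps.length then
        let ps := rlpTrim ps
        if 1 < ps.length ∧ 0 < (PySem.List.pyGetD ps (-1) []).length then
          PySem.List.slice ps none (some (-1))
        else ps
      else ps
    String.ofList (PySem.Chars.join ['/'] ps)

-- ===== PORT B =====
-- Source B's first while loop: `while i > 0 and path[i-1] == "/": i -= 1`
-- (the read index i-1 satisfies 0 <= i-1 < len(path) whenever it is read, by the loop guard,
--  so List.getD is an exact port of the in-range Python indexing path[i-1])
def rlpScanSlash (cs : List Char) : Nat → Nat
  | 0 => 0
  | i + 1 => if cs.getD i ' ' == '/' then rlpScanSlash cs i else i + 1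

-- Source B's second while loop: `while j > 0 and path[j-1] != "/": j -= 1` (same in-range remark)
def rlpScanSeg (cs : List Char) : Nat → Nat
  | 0 => 0
  | j + 1 => if cs.getD j ' ' != '/' then rlpScanSeg cs j else j + 1

def remove_last_path_alt (path : String) : String :=
  if path == "/" then path
  else
    let cs := path.toList
    let i := rlpScanSlash cs cs.length
    let j := rlpScanSeg cs i
    if 0 < j then String.ofList (PySem.List.slice cs none (some ((j : Int) - 1)))
    else String.ofList (PySem.List.slice cs none (some (i : Int)))

-- ===== PRECONDITION & SPEC =====
def Spec_remove_last_path (path : String) (out : String) : Prop := out = remove_last_path_alt path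
instance (path : String) (out : String) : Decidable (Spec_remove_last_path path out) := by unfold Spec_remove_last_path; infer_instance

-- ===== CLAIM (what is proved, stated in full; the proofs are below) =====
def Claim_equal_remove_last_path : Prop := ∀ (path : String), Dom_remove_last_path path → Spec_remove_last_path path (remove_last_path path)

-- ===== LEMMAS AND PROOFS =====

theorem rlp_go_splitOnP (fuel : Nat) : ∀ (l cur : List Char) (acc : List (List Char)),
    l.length < fuel →
    PySem.Chars.splitOn.go ['/'] fuel l cur acc
      = acc.reverse ++ (List.splitOnP (· == '/') l).modifyHead (cur.reverse ++ ·) := by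
  induction fuel with
  | zero => intro l cur acc h; omega
  | succ f ih =>
    intro l cur acc h
    match l with
    | [] =>
      rw [PySem.Chars.splitOn.go.eq_def]
      simp [List.splitOnP_nil]
    | c :: rest =>
      rw [PySem.Chars.splitOn.go.eq_def]
      by_cases hc : c = '/'
      · subst hc
        simp only [List.isPrefixOf, BEq.rfl, Bool.true_and, if_pos, List.length_cons,
          List.length_nil, List.drop_succ_cons, List.drop_zero]
        rw [ih rest [] (cur.reverse :: acc) (by simpa using Nat.lt_of_succ_lt_succ h)]
        rcases hsp : List.splitOnP (· == '/') rest with _ | ⟨a, as⟩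
        · exact absurd hsp (List.splitOnP_ne_nil _ _)
        · simp [List.splitOnP_cons, hsp]
      · have hpre : List.isPrefixOf ['/'] (c :: rest) = false := by
          simp [List.isPrefixOf]; exact fun hcc => absurd hcc.symm hc
        simp only [hpre, Bool.false_eq_true, if_false]
        rw [ih rest (c :: cur) acc (by simpa using Nat.lt_of_succ_lt_succ h)]
        rcases hsp : List.splitOnP (· == '/') rest with _ | ⟨a, as⟩
        · exact absurd hsp (List.splitOnP_ne_nil _ _)
        · simp [List.splitOnP_cons, hsp, hc]

theorem rlp_splitOn_eq (s : List Char) :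
    PySem.Chars.splitOn s ['/'] = List.splitOnP (· == '/') s := by
  show PySem.Chars.splitOn.go ['/'] (s.length + 1) s [] [] = _
  rw [rlp_go_splitOnP (s.length + 1) s [] [] (Nat.lt_succ_self _)]
  rcases hsp : List.splitOnP (· == '/') s with _ | ⟨a, as⟩
  · exact absurd hsp (List.splitOnP_ne_nil _ _)
  · simp

theorem rlp_splitOnP_free (v : List Char) (h : ('/' : Char) ∉ v) :
    List.splitOnP (· == '/') v = [v] := by
  induction v with
  | nil => simp [List.splitOnP_nil]
  | cons a as ih =>
    have ha : a ≠ '/' := fun hh => h (hh ▸ List.mem_cons_self)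
    rw [List.splitOnP_cons]
    simp only [beq_iff_eq, ha, if_false]
    rw [ih (fun hm => h (List.mem_cons_of_mem a hm))]
    simp

theorem rlp_splitOnP_append_cons (u v : List Char) :
    List.splitOnP (· == '/') (u ++ '/' :: v)
      = List.splitOnP (· == '/') u ++ List.splitOnP (· == '/') v := by
  induction u with
  | nil => simp [List.splitOnP_cons, List.splitOnP_nil]
  | cons a as ih =>
    rw [List.cons_append, List.splitOnP_cons, List.splitOnP_cons (xs := as)]
    by_cases ha : a = '/'
    · simp [ha, ih]
    · simp only [beq_iff_eq, ha, if_false]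
      rw [ih]
      rcases hsp : List.splitOnP (· == '/') as with _ | ⟨b, bs⟩
      · exact absurd hsp (List.splitOnP_ne_nil _ _)
      · simp

theorem rlp_splitOnP_rep (t : List Char) (k : Nat) :
    List.splitOnP (· == '/') (t ++ List.replicate k '/')
      = List.splitOnP (· == '/') t ++ List.replicate k [] := by
  induction k with
  | zero => simp
  | succ n ih =>
    rw [show List.replicate (n+1) '/' = List.replicate n '/' ++ ['/'] from List.replicate_succ', ← List.append_assoc,
        show (['/'] : List Char) = '/' :: [] from rfl,
        rlp_splitOnP_append_cons (t ++ List.replicate n '/') [], ih,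
        List.splitOnP_nil,
        show List.replicate (n+1) ([] : List Char) = List.replicate n [] ++ [[]] from List.replicate_succ']
    simp

theorem rlp_trim_qs (qs : List (List Char)) (k : Nat) (hq : qs ≠ []) (hl : qs.getLast hq ≠ []) :
    rlpTrim (qs ++ List.replicate k []) = qs := by
  induction k with
  | zero =>
    rw [List.replicate_zero, List.append_nil, rlpTrim]
    rw [if_neg]
    rw [PySem.List.pyGetD_neg_one (h := hq)]
    simp only [List.length_eq_zero_iff]
    exact fun hand => hl hand.1
  | succ n ih =>
    rw [rlpTrim, if_pos, PySem.List.slice_to_neg_one]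
    · rw [show qs ++ List.replicate (n+1) ([] : List Char)
            = (qs ++ List.replicate n []) ++ [[]] by
        rw [show List.replicate (n+1) ([] : List Char) = List.replicate n [] ++ [[]] from List.replicate_succ', List.append_assoc]]
      rw [List.dropLast_concat]
      exact ih
    · constructor
      · rw [show qs ++ List.replicate (n+1) ([] : List Char)
              = (qs ++ List.replicate n []) ++ [[]] by
          rw [show List.replicate (n+1) ([] : List Char) = List.replicate n [] ++ [[]] from List.replicate_succ', List.append_assoc]]
        rw [PySem.List.pyGetD_neg_one_append_singleton]
        rfl
      · have := List.length_pos_of_ne_nil hq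
        simp only [List.length_append, List.length_replicate]
        omega

theorem rlp_trim_rep (k : Nat) : rlpTrim (List.replicate (k + 1) ([] : List Char)) = [[]] := by
  induction k with
  | zero => rw [rlpTrim, if_neg (by simp)]; simp
  | succ n ih =>
    rw [rlpTrim, if_pos, PySem.List.slice_to_neg_one]
    · rw [show List.replicate (n+2) ([] : List Char) = List.replicate (n+1) [] ++ [[]] from List.replicate_succ',
          List.dropLast_concat]
      exact ih
    · constructor
      · rw [show List.replicate (n+2) ([] : List Char) = List.replicate (n+1) [] ++ [[]] from List.replicate_succ',
            PySem.List.pyGetD_neg_one_append_singleton]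
        rfl
      · simp

theorem rlp_scanSlash_of (cs : List Char) (m k : Nat)
    (h : ∀ n, m ≤ n → n < m + k → cs.getD n ' ' = '/') :
    rlpScanSlash cs (m + k) = rlpScanSlash cs m := by
  induction k with
  | zero => rfl
  | succ n ih =>
    have : m + (n + 1) = (m + n) + 1 := by omega
    rw [this, rlpScanSlash]
    rw [if_pos (by simpa using h (m + n) (by omega) (by omega))]
    exact ih (fun n' h1 h2 => h n' h1 (by omega))

theorem rlp_scanSeg_of (cs : List Char) (m k : Nat)
    (h : ∀ n, m ≤ n → n < m + k → cs.getD n ' ' ≠ '/') :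
    rlpScanSeg cs (m + k) = rlpScanSeg cs m := by
  induction k with
  | zero => rfl
  | succ n ih =>
    have : m + (n + 1) = (m + n) + 1 := by omega
    rw [this, rlpScanSeg]
    rw [if_pos (by simpa using h (m + n) (by omega) (by omega))]
    exact ih (fun n' h1 h2 => h n' h1 (by omega))

theorem rlp_exists_trailing (cs : List Char) :
    ∃ t k, cs = t ++ List.replicate k '/' ∧ (t = [] ∨ t.getLast? ≠ some '/') := by
  induction cs using List.reverseRecOn with
  | nil => exact ⟨[], 0, by simp, Or.inl rfl⟩
  | append_singleton xs x ih =>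
    by_cases hx : x = '/'
    · obtain ⟨t, k, heq, hlast⟩ := ih
      refine ⟨t, k + 1, ?_, hlast⟩
      rw [hx, heq, show List.replicate (k+1) '/' = List.replicate k '/' ++ ['/'] from List.replicate_succ',
          List.append_assoc]
    · exact ⟨xs ++ [x], 0, by simp, Or.inr (by simp [hx])⟩

theorem rlp_exists_seg (t : List Char) (h : ('/' : Char) ∈ t) :
    ∃ u v, t = u ++ '/' :: v ∧ ('/' : Char) ∉ v := by
  induction t using List.reverseRecOn with
  | nil => simp at h
  | append_singleton xs x ih =>
    by_cases hx : x = '/'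
    · exact ⟨xs, [], by simp [hx], by simp⟩
    · have hmem : ('/' : Char) ∈ xs := by
        rcases List.mem_append.mp h with h1 | h1
        · exact h1
        · simp at h1; exact absurd h1.symm hx
      obtain ⟨u, v, heq, hv⟩ := ih hmem
      exact ⟨u, v ++ [x], by rw [heq]; simp, by
        intro hm
        rcases List.mem_append.mp hm with h1 | h1
        · exact hv h1
        · simp at h1; exact hx h1.symm⟩

theorem rlp_main (path : String) : remove_last_path path = remove_last_path_alt path := by
  by_cases hp : (path == "/") = true
  · simp [remove_last_path, remove_last_path_alt, hp]
  · unfold remove_last_path remove_last_path_alt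
    rw [eq_false_of_ne_true hp]
    simp only [Bool.false_eq_true, if_false]
    obtain ⟨t, k, hcs, hlast⟩ := rlp_exists_trailing path.toList
    rw [hcs]
    -- i stops at t.length
    have hi : rlpScanSlash (t ++ List.replicate k '/') (t ++ List.replicate k '/').length
        = t.length := by
      have hlen : (t ++ List.replicate k '/').length = t.length + k := by simp
      rw [hlen, rlp_scanSlash_of _ t.length k (by
        intro n h1 h2
        rw [List.getD_append_right t _ ' ' n h1,
            List.getD_eq_getElem _ _ (by simp; omega), List.getElem_replicate])]
      rcases eq_or_ne t [] with ht | ht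
      · rw [ht]; rfl
      · have hlp : 0 < t.length := List.length_pos_of_ne_nil ht
        have hl' : t.getLast ht ≠ '/' := by
          intro hh
          exact (hlast.resolve_left ht) (by rw [List.getLast?_eq_some_getLast ht, hh])
        have hget : (t ++ List.replicate k '/').getD (t.length - 1) ' ' = t.getLast ht := by
          rw [List.getD_append t _ ' ' _ (by omega), List.getD_eq_getElem _ _ (by omega),
              List.getLast_eq_getElem ht]
        rw [show t.length = (t.length - 1) + 1 by omega, rlpScanSlash,
            if_neg (by simp only [beq_iff_eq]; rw [hget]; exact hl')]
    rw [hi, rlp_splitOn_eq, rlp_splitOnP_rep]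
    by_cases hmem : ('/' : Char) ∈ t
    · -- t = u ++ '/' :: v with v slash-free; A drops v, B cuts at the slash
      obtain ⟨u, v, heq, hv⟩ := rlp_exists_seg t hmem
      have ht : t ≠ [] := by rw [heq]; simp
      have hvne : v ≠ [] := by
        intro hh
        refine (hlast.resolve_left ht) ?_
        rw [heq, hh, List.getLast?_eq_some_getLast (by simp), List.getLast_concat]
      -- A side
      have hsp : List.splitOnP (· == '/') t = List.splitOnP (· == '/') u ++ [v] := by
        rw [heq, rlp_splitOnP_append_cons, rlp_splitOnP_free v hv]
      have hspu : List.splitOnP (· == '/') u ≠ [] := List.splitOnP_ne_nil _ _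
      have hlu : 0 < (List.splitOnP (· == '/') u).length := List.length_pos_of_ne_nil hspu
      have houter : 1 < (List.splitOnP (· == '/') t ++ List.replicate k ([] : List Char)).length := by
        rw [hsp]; simp; omega
      rw [if_pos houter]
      have htrim : rlpTrim (List.splitOnP (· == '/') t ++ List.replicate k [])
          = List.splitOnP (· == '/') u ++ [v] := by
        rw [hsp]
        exact rlp_trim_qs _ k (by simp) (by rw [List.getLast_concat]; exact hvne)
      rw [htrim]
      have hinner : 1 < (List.splitOnP (· == '/') u ++ [v]).length ∧
          0 < (PySem.List.pyGetD (List.splitOnP (· == '/') u ++ [v]) (-1) []).length := by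
        constructor
        · simp; omega
        · rw [PySem.List.pyGetD_neg_one_append_singleton]
          exact List.length_pos_of_ne_nil hvne
      rw [if_pos hinner, PySem.List.slice_to_neg_one, List.dropLast_concat]
      -- B side
      have hj : rlpScanSeg (t ++ List.replicate k '/') t.length = u.length + 1 := by
        rw [show t.length = (u.length + 1) + v.length by rw [heq]; simp; omega]
        rw [rlp_scanSeg_of _ (u.length + 1) v.length (by
          intro n h1 h2
          have hnt : n < t.length := by rw [heq]; simp; omega
          rw [List.getD_append _ _ ' ' n hnt, heq,
              List.getD_eq_getElem _ _ (by simp; omega),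
              List.getElem_append_right (by omega)]
          obtain ⟨m, hm⟩ : ∃ m, n - u.length = m + 1 := ⟨n - u.length - 1, by omega⟩
          simp only [hm, List.getElem_cons_succ]
          intro hh
          exact hv (hh ▸ List.getElem_mem _))]
        have hslash : (t ++ List.replicate k '/').getD u.length ' ' = '/' := by
          rw [List.getD_append _ _ ' ' u.length (by rw [heq]; simp),
              heq, List.getD_eq_getElem _ _ (by simp),
              List.getElem_append_right (Nat.le_refl u.length)]
          simp
        rw [rlpScanSeg, if_neg (by simp only [bne_iff_ne, ne_eq, not_not]; exact hslash)]
      rw [hj, if_pos (by omega)]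
      -- both sides are u
      rw [show (((u.length + 1 : Nat) : Int)) - 1 = ((u.length : Nat) : Int) by push_cast; ring,
          PySem.List.slice_to_natCast, heq, List.append_assoc, List.take_left]
      rw [PySem.Chars.join.eq_1,
          show List.splitOnP (· == '/') u = List.splitOn '/' u from rfl,
          List.intercalate_splitOn u '/']
    · -- t is slash-free: A keeps the single segment, B cuts nothing
      rw [rlp_splitOnP_free t hmem]
      have hj0 : rlpScanSeg (t ++ List.replicate k '/') t.length = 0 := by
        have h0 := rlp_scanSeg_of (t ++ List.replicate k '/') 0 t.length (by
          intro n h1 h2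
          rw [List.getD_append _ _ ' ' n (by omega), List.getD_eq_getElem _ _ (by omega)]
          intro hh
          exact hmem (hh ▸ List.getElem_mem _))
        simpa using h0
      rw [hj0, if_neg (show ¬ (0:Nat) < 0 by omega), PySem.List.slice_to_natCast, List.take_left]
      rcases Nat.eq_zero_or_pos k with hk | hk
      · subst hk
        simp only [List.replicate_zero, List.append_nil]
        rw [if_neg (by simp), PySem.Chars.join_singleton]
      · rw [if_pos (by simp; omega)]
        rcases eq_or_ne t [] with ht | ht
        · subst ht
          rw [show ([[]] : List (List Char)) ++ List.replicate k [] = List.replicate (k + 1) [] by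
                simp [List.replicate_succ],
              rlp_trim_rep k, if_neg (by simp), PySem.Chars.join_singleton]
        · rw [rlp_trim_qs [t] k (by simp) (by simpa using ht),
              if_neg (by simp), PySem.Chars.join_singleton]

-- ===== VERDICT (by name: the statement is the Claim_ definition above) =====
theorem remove_last_path_spec : Claim_equal_remove_last_path := by
  intro path _
  unfold Spec_remove_last_path
  exact rlp_main path
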